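-- pv_equiv track=rewrite | github.com/blue-blues/nexagent | app_backup_20250502_164125/planning/visualization.py | format_branch_visualization_as_markdown
-- ===== SOURCE A (Python) =====
-- from typing import Dict, List, Optional, Any, Union, Tuple
--
-- def format_branch_visualization_as_markdown(
--     plan_id: str,
--     branches: Dict[str, str],
--     current_branch: str
-- ) -> str:
--     """
--     Format branch information as markdown.
--
--     Args:
--         plan_id: ID of the plan
--         branches: Dictionary mapping branch names to parent branches
--         current_branch: Name of the current active branch
--
--     Returns:
--         str: Markdown representation of the branch structure
--     """
--     output = []
--
--     # Add header
--     output.append(f"# Branch Structure for Plan: {plan_id}")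
--     output.append("")
--
--     # Add current branch
--     output.append(f"**Current Branch:** `{current_branch}`")
--     output.append("")
--
--     # Add branch list
--     output.append("## Branches")
--     output.append("")
--
--     # Build branch tree
--     branch_tree = {}
--     root_branches = []
--
--     for branch, parent in branches.items():
--         if parent:
--             if parent not in branch_tree:
--                 branch_tree[parent] = []
--             branch_tree[parent].append(branch)
--         else:
--             root_branches.append(branch)
--
--     # Print branch tree
--     def print_branch(branch, depth=0):
--         is_current = branch == current_branch
--         marker = "**" if is_current else ""
--         output.append(f"{'  ' * depth}- {marker}{branch}{marker}")
--
--         if branch in branch_tree: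
--             children = sorted(branch_tree[branch])
--             for child in children:
--                 print_branch(child, depth + 1)
--
--     for root in sorted(root_branches):
--         print_branch(root)
--
--     # Add a mermaid diagram
--     output.append("")
--     output.append("## Branch Visualization")
--     output.append("")
--     output.append("```mermaid")
--     output.append("graph TD")
--
--     # Add nodes
--     for branch in branches:
--         if branch == current_branch:
--             output.append(f"    {branch}[\"{branch}\"]:::current")
--         else:
--             output.append(f"    {branch}[\"{branch}\"]")
--
--     # Add edges
--     for branch, parent in branches.items():
--         if parent:
--             output.append(f"    {parent} --> {branch}")
--
--     # Add style for current branch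
--     output.append("    classDef current fill:#e1f5fe,stroke:#03a9f4,stroke-width:2px")
--
--     output.append("```")
--
--     return "\n".join(output)
-- ===== SOURCE B (Python) =====
-- def format_branch_visualization_as_markdown(plan_id, branches, current_branch):
--     # Same output as the recursive version, but the branch tree is rendered with an
--     # explicit LIFO stack of (branch, depth) pairs instead of recursion, and the
--     # mermaid node/edge sections are list comprehensions instead of append loops.
--     tree = {}
--     roots = []
--     for branch, parent in branches.items():
--         if parent:
--             tree[parent] = tree.get(parent, []) + [branch]
--         else:
--             roots.append(branch)
--
--     lines = [
--         f"# Branch Structure for Plan: {plan_id}",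
--         "",
--         f"**Current Branch:** `{current_branch}`",
--         "",
--         "## Branches",
--         "",
--     ]
--
--     stack = [(r, 0) for r in reversed(sorted(roots))]
--     while stack:
--         branch, depth = stack.pop()
--         marker = "**" if branch == current_branch else ""
--         lines.append(f"{'  ' * depth}- {marker}{branch}{marker}")
--         if branch in tree:
--             stack.extend((c, depth + 1) for c in reversed(sorted(tree[branch])))
--
--     lines += ["", "## Branch Visualization", "", "```mermaid", "graph TD"]
--     lines += [
--         f'    {branch}["{branch}"]' + (":::current" if branch == current_branch else "")
--         for branch in branches
--     ]
--     lines += [f"    {parent} --> {branch}" for branch, parent in branches.items() if parent]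
--     lines.append("    classDef current fill:#e1f5fe,stroke:#03a9f4,stroke-width:2px")
--     lines.append("```")
--     return "\n".join(lines)
-- ===== Notes on version B (the rewrite author's own statement) =====
-- stated objective: alternative
-- what changed: The recursive print_branch is replaced by an explicit LIFO stack of (branch, depth) pairs (pushing reverse-sorted children to reproduce pre-order), and the mermaid node/edge append loops become list comprehensions; the tree build stays a single pass.
import Mathlib
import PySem

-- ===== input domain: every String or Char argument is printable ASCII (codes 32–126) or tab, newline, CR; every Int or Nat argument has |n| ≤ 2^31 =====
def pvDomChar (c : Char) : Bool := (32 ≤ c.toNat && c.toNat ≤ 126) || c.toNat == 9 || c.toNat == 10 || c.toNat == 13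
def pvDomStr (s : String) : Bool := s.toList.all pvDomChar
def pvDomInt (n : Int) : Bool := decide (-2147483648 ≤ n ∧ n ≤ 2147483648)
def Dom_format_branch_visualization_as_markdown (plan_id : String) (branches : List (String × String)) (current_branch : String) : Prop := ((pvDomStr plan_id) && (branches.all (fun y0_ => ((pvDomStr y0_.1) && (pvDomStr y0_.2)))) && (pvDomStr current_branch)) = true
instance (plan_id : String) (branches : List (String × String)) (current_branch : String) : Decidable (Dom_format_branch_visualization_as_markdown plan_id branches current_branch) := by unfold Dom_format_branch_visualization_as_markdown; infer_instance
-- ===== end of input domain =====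

-- B renders the branch tree with an explicit stack instead of recursion and the mermaid
-- sections as map/filter comprehensions instead of append loops; same return value (alternative, not faster).

-- f-strings are ported as String.mk over concatenated char lists (exact: a String is its char list).
-- '  ' * depth (exact: repetition of the two-space literal)
def pvIndent (depth : Nat) : List Char := (List.replicate depth "  ".toList).flatten

-- the tree line f"{'  ' * depth}- {marker}{branch}{marker}" (formatting helper shared by both ports)
def pvBranchLine (current_branch branch : String) (depth : Nat) : String :=
  let marker : List Char := if branch == current_branch then "**".toList else []
  String.mk (pvIndent depth ++ "- ".toList ++ marker ++ branch.toList ++ marker)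

-- ===== PORT A =====
-- one step of A's tree-building loop over branches.items(); state = (branch_tree, root_branches)
def pvBuildStepA (st : PySem.Dict String (List String) × List String) (e : String × String) :
    PySem.Dict String (List String) × List String :=
  if e.2 ≠ "" then
    -- if parent not in branch_tree: branch_tree[parent] = [];  branch_tree[parent].append(branch)
    let t := if st.1.contains e.2 then st.1 else st.1.insert e.2 []
    (t.modify e.2 [] (fun l => l ++ [e.1]), st.2)
  else
    (st.1, st.2 ++ [e.1])

-- print_branch ('if branch in branch_tree: ... branch_tree[branch]' is contains + getD, exact
-- under the guard).  fuel bounds the recursion depth; the root call passes branches.length + 1,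
-- which the Python recursion (over a dict, whose keys are unique) never exceeds.
def pvPrintBranchA (tree : PySem.Dict String (List String)) (current_branch : String) :
    Nat → String → Nat → List String → List String
  | 0, _, _, out => out
  | fuel + 1, branch, depth, out =>
    let out := out ++ [pvBranchLine current_branch branch depth]
    if tree.contains branch then
      (PySem.List.sorted (tree.getD branch []) (fun x => x) false).foldl
        (fun o c => pvPrintBranchA tree current_branch fuel c (depth + 1) o) out
    else out

def format_branch_visualization_as_markdown (plan_id : String) (branches : List (String × String)) (current_branch : String) : String :=
  let output : List String :=
    [String.mk ("# Branch Structure for Plan: ".toList ++ plan_id.toList), "",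
     String.mk ("**Current Branch:** `".toList ++ current_branch.toList ++ "`".toList), "",
     "## Branches", ""]
  let st := branches.foldl pvBuildStepA (PySem.Dict.empty, [])
  let tree := st.1
  let output := (PySem.List.sorted st.2 (fun x => x) false).foldl
    (fun o r => pvPrintBranchA tree current_branch (branches.length + 1) r 0 o) output
  let output := output ++ ["", "## Branch Visualization", "", "```mermaid", "graph TD"]
  -- for branch in branches: (dict iteration = the keys in insertion order)
  let output := branches.foldl
    (fun o e =>
      if e.1 == current_branch then
        o ++ [String.mk ("    ".toList ++ e.1.toList ++ "[\"".toList ++ e.1.toList ++ "\"]:::current".toList)]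
      else
        o ++ [String.mk ("    ".toList ++ e.1.toList ++ "[\"".toList ++ e.1.toList ++ "\"]".toList)]) output
  let output := branches.foldl
    (fun o e =>
      if e.2 ≠ "" then
        o ++ [String.mk ("    ".toList ++ e.2.toList ++ " --> ".toList ++ e.1.toList)]
      else o) output
  let output := output ++ ["    classDef current fill:#e1f5fe,stroke:#03a9f4,stroke-width:2px", "```"]
  PySem.Str.join "\n" output

-- ===== PORT B =====
-- one step of B's tree-building loop: tree[parent] = tree.get(parent, []) + [branch]
def pvBuildStepB (st : PySem.Dict String (List String) × List String) (e : String × String) :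
    PySem.Dict String (List String) × List String :=
  if e.2 ≠ "" then
    (st.1.modify e.2 [] (fun l => l ++ [e.1]), st.2)
  else
    (st.1, st.2 ++ [e.1])

-- the stack loop.  Python's stack keeps its top at the END of the list; here the head of the
-- list is the top, so pushing reversed(sorted(...)) becomes prepending sorted(...).
-- Each entry carries a depth budget (a Lean termination device, like pvPrintBranchA's fuel:
-- entries start at branches.length, which the loop never exhausts on a dict's unique keys).
def pvGoWeight (S : Nat) : Nat → Nat
  | 0 => 1
  | f + 1 => 1 + S * pvGoWeight S f

theorem pvGoWeight_pos (S f : Nat) : 0 < pvGoWeight S f := by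
  cases f <;> simp [pvGoWeight]

theorem pv_get?_mem_values {ν : Type} (d : PySem.Dict String ν) (k : String) (v : ν)
    (h : PySem.Dict.get? d k = some v) : v ∈ PySem.Dict.values d := by
  obtain ⟨l⟩ := d
  induction l with
  | nil => simp [PySem.Dict.get?] at h
  | cons p rest ih =>
    rw [PySem.Dict.get?_mk_cons] at h
    by_cases hk : p.1 == k
    · simp [hk] at h
      simp [PySem.Dict.values, ← h]
    · simp [hk] at h
      have := ih h
      simp [PySem.Dict.values] at this ⊢
      exact Or.inr this

theorem pv_getD_len_le (tree : PySem.Dict String (List String)) (b : String) :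
    (tree.getD b []).length ≤ ((PySem.Dict.values tree).map List.length).sum := by
  cases hg : PySem.Dict.get? tree b with
  | none => simp [PySem.Dict.getD_of_get?_eq_none tree [] hg]
  | some cs =>
    rw [PySem.Dict.getD_of_get?_eq_some tree [] hg]
    have hm : cs.length ∈ (PySem.Dict.values tree).map List.length :=
      List.mem_map_of_mem (pv_get?_mem_values tree b cs hg)
    exact List.single_le_sum (fun _ _ => Nat.zero_le _) _ hm

def pvGoB (tree : PySem.Dict String (List String)) (current_branch : String) :
    List (String × Nat × Nat) → List String → List String
  | [], acc => acc
  | (b, d, f) :: rest, acc =>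
    let acc := acc ++ [pvBranchLine current_branch b d]
    if tree.contains b then
      match f with
      | fb + 1 =>
        pvGoB tree current_branch
          ((PySem.List.sorted (tree.getD b []) (fun x => x) false).map
            (fun c => (c, d + 1, fb)) ++ rest) acc
      | 0 => pvGoB tree current_branch rest acc
    else pvGoB tree current_branch rest acc
termination_by stack _ =>
  (stack.map (fun e => pvGoWeight ((PySem.Dict.values tree).map List.length).sum e.2.2)).sum
decreasing_by
  · set S := ((PySem.Dict.values tree).map List.length).sum
    have hlen : (PySem.List.sorted (tree.getD b []) (fun x => x) false).length ≤ S := by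
      rw [PySem.List.length_sorted]
      exact pv_getD_len_le tree b
    simp only [List.map_append, List.sum_append, List.map_map, List.map_cons, List.sum_cons]
    have hconst : ∀ (l : List String),
        (l.map ((fun e => pvGoWeight S e.2.2) ∘ fun c => (c, d + 1, fb))).sum
        = l.length * pvGoWeight S fb := by
      intro l
      induction l with
      | nil => simp
      | cons x xs ih => simp [ih]; ring
    rw [hconst]
    have h1 : (PySem.List.sorted (tree.getD b []) (fun x => x) false).length * pvGoWeight S fb
        ≤ S * pvGoWeight S fb := Nat.mul_le_mul_right _ hlen
    have h2 : pvGoWeight S fb.succ = 1 + S * pvGoWeight S fb := rfl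
    omega
  · simp only [List.map_cons, List.sum_cons]
    have := pvGoWeight_pos ((PySem.Dict.values tree).map List.length).sum 0
    omega
  · simp only [List.map_cons, List.sum_cons]
    have := pvGoWeight_pos ((PySem.Dict.values tree).map List.length).sum f
    omega

def format_branch_visualization_as_markdown_alt (plan_id : String) (branches : List (String × String)) (current_branch : String) : String :=
  let st := branches.foldl pvBuildStepB (PySem.Dict.empty, [])
  let header : List String :=
    [String.mk ("# Branch Structure for Plan: ".toList ++ plan_id.toList), "",
     String.mk ("**Current Branch:** `".toList ++ current_branch.toList ++ "`".toList), "",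
     "## Branches", ""]
  let treeLines := pvGoB st.1 current_branch
    ((PySem.List.sorted st.2 (fun x => x) false).map (fun r => (r, 0, branches.length))) header
  let nodeLines := branches.map (fun e =>
    String.mk ("    ".toList ++ e.1.toList ++ "[\"".toList ++ e.1.toList ++ "\"]".toList ++
      (if e.1 == current_branch then ":::current".toList else [])))
  let edgeLines := (branches.filter (fun e => decide (e.2 ≠ ""))).map (fun e =>
    String.mk ("    ".toList ++ e.2.toList ++ " --> ".toList ++ e.1.toList))
  PySem.Str.join "\n"
    (treeLines ++ ["", "## Branch Visualization", "", "```mermaid", "graph TD"]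
      ++ nodeLines ++ edgeLines
      ++ ["    classDef current fill:#e1f5fe,stroke:#03a9f4,stroke-width:2px", "```"])

-- ===== PRECONDITION & SPEC =====
def Spec_format_branch_visualization_as_markdown (plan_id : String) (branches : List (String × String)) (current_branch : String) (out : String) : Prop := out = format_branch_visualization_as_markdown_alt plan_id branches current_branch
instance (plan_id : String) (branches : List (String × String)) (current_branch : String) (out : String) : Decidable (Spec_format_branch_visualization_as_markdown plan_id branches current_branch out) := by unfold Spec_format_branch_visualization_as_markdown; infer_instance

-- ===== CLAIM (what is proved, stated in full; the proofs are below) =====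
def Claim_equal_format_branch_visualization_as_markdown : Prop := ∀ (plan_id : String) (branches : List (String × String)) (current_branch : String), Dom_format_branch_visualization_as_markdown plan_id branches current_branch → Spec_format_branch_visualization_as_markdown plan_id branches current_branch (format_branch_visualization_as_markdown plan_id branches current_branch)

-- ===== LEMMAS AND PROOFS =====

-- seeding an absent key with [] and then modifying it equals modifying with default []
theorem pv_seed_modify (t : PySem.Dict String (List String)) (p : String)
    (g : List String → List String) (h : t.contains p = false) :
    (t.insert p []).modify p [] g = t.modify p [] g := by
  have hmod : ∀ (d : PySem.Dict String (List String)),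
      d.modify p [] g = d.insert p (g (d.getD p [])) := fun _ => rfl
  rw [hmod, hmod, PySem.Dict.getD_insert_self, PySem.Dict.getD_of_not_contains t [] h]
  have hk : ∀ q ∈ t.items, q.1 ≠ p := by
    intro q hq hqp
    have : t.contains p = true := by
      rw [PySem.Dict.contains_iff_mem_keys]
      exact hqp ▸ PySem.Dict.mem_keys_of_mem_items t hq
    simp [this] at h
  apply PySem.Dict.ext
  rw [PySem.Dict.items_insert_of_contains _ _ (PySem.Dict.contains_insert_self t p []),
      PySem.Dict.items_insert_of_not_contains t _ h,
      PySem.Dict.items_insert_of_not_contains t _ h]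
  rw [List.map_append]
  congr 1
  · rw [List.map_congr_left (g := id) (fun q hq => by simp [hk q hq]), List.map_id]
  · simp

-- the two tree-building steps agree
theorem pvBuildStep_eq : pvBuildStepA = pvBuildStepB := by
  funext st e
  unfold pvBuildStepA pvBuildStepB
  by_cases hp : e.2 = "" <;> simp [hp]
  by_cases hc : st.1.contains e.2 = true
  · simp [hc]
  · simp [hc, pv_seed_modify st.1 e.2 _ (by simpa using hc)]

-- pushing a block of sibling entries processes them left to right like A's foldl
theorem pvGoB_entries (tree : PySem.Dict String (List String)) (cur : String) (f : Nat)
    (h : ∀ b d rest acc, pvGoB tree cur ((b, d, f) :: rest) acc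
        = pvGoB tree cur rest (pvPrintBranchA tree cur (f + 1) b d acc)) :
    ∀ (l : List String) (dd : Nat) (rest : List (String × Nat × Nat)) (acc : List String),
      pvGoB tree cur (l.map (fun c => (c, dd, f)) ++ rest) acc
        = pvGoB tree cur rest (l.foldl (fun o c => pvPrintBranchA tree cur (f + 1) c dd o) acc) := by
  intro l
  induction l with
  | nil => intro dd rest acc; rfl
  | cons x xs ih =>
    intro dd rest acc
    simp only [List.map_cons, List.cons_append, List.foldl_cons]
    rw [h, ih]

-- popping one stack entry emits exactly what one recursive call of A emits
theorem pvGoB_spec (tree : PySem.Dict String (List String)) (cur : String) :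
    ∀ (f : Nat) (b : String) (d : Nat) (rest : List (String × Nat × Nat)) (acc : List String),
      pvGoB tree cur ((b, d, f) :: rest) acc
        = pvGoB tree cur rest (pvPrintBranchA tree cur (f + 1) b d acc) := by
  intro f
  induction f with
  | zero =>
    intro b d rest acc
    rw [pvGoB]
    cases hcont : tree.contains b <;>
      simp [hcont, pvPrintBranchA]
  | succ f' ih =>
    intro b d rest acc
    rw [pvGoB]
    cases hcont : tree.contains b with
    | false => simp [hcont, pvPrintBranchA]
    | true =>
      rw [if_pos rfl]
      rw [pvGoB_entries tree cur f' ih]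
      simp [pvPrintBranchA, hcont]

-- running the stack on a block of root entries is A's foldl over the sorted roots
theorem pvGoB_run (tree : PySem.Dict String (List String)) (cur : String) (f : Nat)
    (l : List String) (dd : Nat) (acc : List String) :
    pvGoB tree cur (l.map (fun c => (c, dd, f))) acc
      = l.foldl (fun o c => pvPrintBranchA tree cur (f + 1) c dd o) acc := by
  have h := pvGoB_entries tree cur f (pvGoB_spec tree cur f) l dd [] acc
  rw [List.append_nil] at h
  rw [h, pvGoB]

-- ===== VERDICT (by name: the statement is the Claim_ definition above) =====
theorem format_branch_visualization_as_markdown_spec : Claim_equal_format_branch_visualization_as_markdown := by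
  intro plan_id branches current_branch _
  unfold Spec_format_branch_visualization_as_markdown
  simp only [format_branch_visualization_as_markdown, format_branch_visualization_as_markdown_alt]
  rw [pvBuildStep_eq, pvGoB_run]
  rw [show (fun (o : List String) (e : String × String) =>
      if e.1 == current_branch then
        o ++ [String.mk ("    ".toList ++ e.1.toList ++ "[\"".toList ++ e.1.toList ++ "\"]:::current".toList)]
      else
        o ++ [String.mk ("    ".toList ++ e.1.toList ++ "[\"".toList ++ e.1.toList ++ "\"]".toList)])
    = (fun (o : List String) (e : String × String) =>
      o ++ [String.mk ("    ".toList ++ e.1.toList ++ "[\"".toList ++ e.1.toList ++ "\"]".toList ++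
        (if e.1 == current_branch then ":::current".toList else []))]) from ?_]
  · rw [PySem.List.foldl_append_singleton_eq_map]
    rw [PySem.List.foldl_append_ite
      (p := fun (e : String × String) => e.2 ≠ "")
      (f := fun (e : String × String) =>
        String.mk ("    ".toList ++ e.2.toList ++ " --> ".toList ++ e.1.toList))]
  · funext o e
    by_cases hcur : e.1 == current_branch
    · simp only [hcur, if_true]
      congr 2
      rw [show "\"]:::current".toList = "\"]".toList ++ ":::current".toList from by decide]
      simp [List.append_assoc]
    · simp [hcur]
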